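-- pv_equiv track=rewrite | github.com/sholt6/TXMB_validator_python | validateMetadataTable.py | validate_custom_columns
-- ===== SOURCE A (Python) =====
-- def validate_custom_columns(table_custom_columns, record_custom_columns):
-- 	"""Checks custom columns from metadata record all match with custom columns
-- 	from metadata table
--
-- 	Keyword arguments:
-- 	table_custom_columns -- list, custom columns found in table
-- 	record_custom_columns -- dict, custom columns specified in metadata record
--
-- 	Returns:
-- 	custom_column_errors -- list of any errors found with custom columns
-- 	"""
--
-- 	custom_column_errors = []
--
-- 	record_headers = list(record_custom_columns.keys())
--
-- 	if (not table_custom_columns) and (not record_custom_columns):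
-- 		return custom_column_errors
-- 	elif (table_custom_columns) and (not record_custom_columns):
-- 		message = ("Custom columns are used in the metadata table without "
-- 				   "being defined in the metadata record")
-- 		custom_column_errors.append(message)
-- 		return custom_column_errors
-- 	elif (not table_custom_columns) and (record_custom_columns):
-- 		message = ("Custom columns are defined in the metadata record without "
-- 				   "being used in the metadata table")
-- 		custom_column_errors.append(message)
-- 		return custom_column_errors
--
-- 	record_headers.sort()
-- 	table_custom_columns.sort()
--
-- 	if (len(record_headers) != len(table_custom_columns)):
-- 		message = ("Number of custom headers is mismatched between metadata "
-- 				   "record and metadata table.")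
-- 		custom_column_errors.append(message)
--
-- 	for record_index in range(0, len(record_headers)):
-- 		try:
-- 			header_to_check = record_headers[record_index]
-- 			table_index = table_custom_columns.index(header_to_check)
-- 		except ValueError:
-- 			message = ("A custom header specified in the metadata record, does"
-- 					   " not exist in the metadata table: {0}".format(header_to_check))
-- 			custom_column_errors.append(message)
-- 			continue
--
-- 		table_custom_columns.pop(table_index)
--
-- 	if table_custom_columns:
-- 		message = ("One or more headers used in the metadata table were "
-- 				   "not defined in the metadata record: {0}".format(table_custom_columns))
-- 		custom_column_errors.append(message)
--
-- 	return custom_column_errors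
-- ===== SOURCE B (Python) =====
-- def validate_custom_columns(table_custom_columns, record_custom_columns):
--     if not table_custom_columns and not record_custom_columns:
--         return []
--     if table_custom_columns and not record_custom_columns:
--         return ["Custom columns are used in the metadata table without "
--                 "being defined in the metadata record"]
--     if not table_custom_columns:
--         return ["Custom columns are defined in the metadata record without "
--                 "being used in the metadata table"]
--
--     record_headers = sorted(record_custom_columns)
--     table_custom_columns.sort()
--     errors = []
--     if len(record_headers) != len(table_custom_columns):
--         errors.append("Number of custom headers is mismatched between metadata "
--                       "record and metadata table.")
--
--     leftovers = []
--     i = j = 0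
--     while i < len(record_headers) and j < len(table_custom_columns):
--         h, x = record_headers[i], table_custom_columns[j]
--         if h < x:
--             errors.append("A custom header specified in the metadata record, does"
--                           " not exist in the metadata table: {0}".format(h))
--             i += 1
--         elif x < h:
--             leftovers.append(x)
--             j += 1
--         else:
--             i += 1
--             j += 1
--     for h in record_headers[i:]:
--         errors.append("A custom header specified in the metadata record, does"
--                       " not exist in the metadata table: {0}".format(h))
--     leftovers.extend(table_custom_columns[j:])
--     table_custom_columns[:] = leftovers
--     if leftovers:
--         errors.append("One or more headers used in the metadata table were "
--                       "not defined in the metadata record: {0}".format(leftovers))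
--     return errors
-- ===== Notes on version B (the rewrite author's own statement) =====
-- stated objective: faster
-- what changed: Replaced A's per-header list.index()+pop() scans over the remaining table (quadratic) by one two-pointer merge over the two sorted lists that emits missing-header errors and collects leftovers in a single pass.
import Mathlib
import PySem

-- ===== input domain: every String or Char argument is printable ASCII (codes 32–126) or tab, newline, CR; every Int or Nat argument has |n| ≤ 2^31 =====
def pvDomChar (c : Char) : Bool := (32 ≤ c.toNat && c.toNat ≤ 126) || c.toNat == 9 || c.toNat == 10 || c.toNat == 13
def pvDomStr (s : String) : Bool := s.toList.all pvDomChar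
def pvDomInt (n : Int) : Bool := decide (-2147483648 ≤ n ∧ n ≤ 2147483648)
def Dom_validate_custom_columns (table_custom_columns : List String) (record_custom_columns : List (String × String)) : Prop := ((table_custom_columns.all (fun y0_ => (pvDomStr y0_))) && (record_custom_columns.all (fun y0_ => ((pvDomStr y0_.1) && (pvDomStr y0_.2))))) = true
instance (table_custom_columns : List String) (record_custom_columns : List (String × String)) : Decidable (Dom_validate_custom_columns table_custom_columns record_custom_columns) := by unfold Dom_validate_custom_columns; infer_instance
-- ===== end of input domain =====

-- B replaces A's quadratic index()/pop() scan over the sorted table by a single two-pointer merge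
-- of the two sorted lists (objective: faster). Python A and B both sort table_custom_columns in
-- place and leave the unmatched leftovers in it; the equivalence proved here is about the return value.
-- ===== PORT A =====
-- Python str/list repr (shared text helper: both Pythons format the leftover list with str.format);
-- exact for strings whose characters are printable ASCII or tab/newline/CR (the stated domain).
def vccStrRepr (s : String) : String :=
  let cs := s.toList
  let q : Char := if cs.contains '\'' && !cs.contains '"' then '"' else '\''
  String.ofList ((q :: cs.flatMap (fun c =>
    if c = '\\' then ['\\', '\\']
    else if c = '\t' then ['\\', 't']
    else if c = '\n' then ['\\', 'n']
    else if c = '\r' then ['\\', 'r']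
    else if c = q then ['\\', q]
    else [c])) ++ [q])

def vccListRepr (xs : List String) : String :=
  "[" ++ String.intercalate ", " (xs.map vccStrRepr) ++ "]"

def vccMsgTableOnly : String :=
  "Custom columns are used in the metadata table without being defined in the metadata record"
def vccMsgRecordOnly : String :=
  "Custom columns are defined in the metadata record without being used in the metadata table"
def vccMsgLen : String :=
  "Number of custom headers is mismatched between metadata record and metadata table."
def vccMsgMissing (h : String) : String :=
  "A custom header specified in the metadata record, does not exist in the metadata table: " ++ h
def vccMsgLeftover (ts : List String) : String :=
  "One or more headers used in the metadata table were not defined in the metadata record: " ++ vccListRepr ts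

-- A's for-loop: try index/except, pop on success (state: error list, remaining table)
def vccLoopA : List String → List String → List String → List String × List String
  | [], errs, ts => (errs, ts)
  | h :: hs, errs, ts =>
    match PySem.List.index? ts h with
    | none => vccLoopA hs (errs ++ [vccMsgMissing h]) ts
    | some i =>
      match PySem.List.pop? ts (i : Int) with
      | some r => vccLoopA hs errs r.2
      | none => vccLoopA hs errs ts

def validate_custom_columns (table_custom_columns : List String) (record_custom_columns : List (String × String)) : List String :=
  let record_headers := record_custom_columns.map Prod.fst
  if table_custom_columns = [] ∧ record_custom_columns = [] then []
  else if ¬ table_custom_columns = [] ∧ record_custom_columns = [] then [vccMsgTableOnly]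
  else if table_custom_columns = [] ∧ ¬ record_custom_columns = [] then [vccMsgRecordOnly]
  else
    let rs := PySem.List.sorted record_headers (fun x => x)
    let ts := PySem.List.sorted table_custom_columns (fun x => x)
    let errs := if rs.length ≠ ts.length then [vccMsgLen] else []
    let res := vccLoopA rs errs ts
    if ¬ res.2 = [] then res.1 ++ [vccMsgLeftover res.2] else res.1

-- ===== PORT B =====
-- B's two-pointer merge over the two sorted lists: (missing-header errors, leftover table entries)
def vccMerge : List String → List String → List String × List String
  | [], ts => ([], ts)
  | h :: hs, [] =>
    let r := vccMerge hs []
    (vccMsgMissing h :: r.1, r.2)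
  | h :: hs, x :: xs =>
    if h < x then
      let r := vccMerge hs (x :: xs)
      (vccMsgMissing h :: r.1, r.2)
    else if x < h then
      let r := vccMerge (h :: hs) xs
      (r.1, x :: r.2)
    else vccMerge hs xs
  termination_by rs ts => rs.length + ts.length

def validate_custom_columns_alt (table_custom_columns : List String) (record_custom_columns : List (String × String)) : List String :=
  if table_custom_columns = [] ∧ record_custom_columns = [] then []
  else if ¬ table_custom_columns = [] ∧ record_custom_columns = [] then [vccMsgTableOnly]
  else if table_custom_columns = [] then [vccMsgRecordOnly]
  else
    let rs := PySem.List.sorted (record_custom_columns.map Prod.fst) (fun x => x)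
    let ts := PySem.List.sorted table_custom_columns (fun x => x)
    let errs := if rs.length ≠ ts.length then [vccMsgLen] else []
    let m := vccMerge rs ts
    errs ++ m.1 ++ (if ¬ m.2 = [] then [vccMsgLeftover m.2] else [])

-- ===== PRECONDITION & SPEC =====
def Spec_validate_custom_columns (table_custom_columns : List String) (record_custom_columns : List (String × String)) (out : List String) : Prop := out = validate_custom_columns_alt table_custom_columns record_custom_columns
instance (table_custom_columns : List String) (record_custom_columns : List (String × String)) (out : List String) : Decidable (Spec_validate_custom_columns table_custom_columns record_custom_columns out) := by unfold Spec_validate_custom_columns; infer_instance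

-- ===== CLAIM (what is proved, stated in full; the proofs are below) =====
def Claim_equal_validate_custom_columns : Prop := ∀ (table_custom_columns : List String) (record_custom_columns : List (String × String)), Dom_validate_custom_columns table_custom_columns record_custom_columns → Spec_validate_custom_columns table_custom_columns record_custom_columns (validate_custom_columns table_custom_columns record_custom_columns)

-- ===== LEMMAS AND PROOFS =====

-- A head element smaller than every record header is never matched: the loop carries it through.
-- One step of A's loop: header absent / header found at index i.
lemma vccLoopA_cons_none (h : String) (hs errs ts : List String) (hnot : h ∉ ts) :
    vccLoopA (h :: hs) errs ts = vccLoopA hs (errs ++ [vccMsgMissing h]) ts := by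
  rw [vccLoopA, (PySem.List.index?_eq_none_iff _ _).mpr hnot]

lemma vccLoopA_cons_idx (h : String) (hs errs ts : List String) (i : Nat)
    (hidx : PySem.List.index? ts h = some i) (hk : i < ts.length) :
    vccLoopA (h :: hs) errs ts = vccLoopA hs errs (ts.eraseIdx i) := by
  rw [vccLoopA, hidx]
  show (match PySem.List.pop? ts ((i : Nat) : Int) with
        | some r => vccLoopA hs errs r.2
        | none => vccLoopA hs errs ts) = _
  rw [PySem.List.pop?_natCast ts i hk]

lemma vccLoopA_cons_lt (rs : List String) (x : String) :
    ∀ (errs ts : List String), (∀ h ∈ rs, x < h) →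
    vccLoopA rs errs (x :: ts) = ((vccLoopA rs errs ts).1, x :: (vccLoopA rs errs ts).2) := by
  induction rs with
  | nil => intro errs ts _; simp [vccLoopA]
  | cons h hs ih =>
    intro errs ts hlt
    have hxh : x ≠ h := ne_of_lt (hlt h (by simp))
    have htail : ∀ h' ∈ hs, x < h' := fun h' hm => hlt h' (by simp [hm])
    cases hidx : PySem.List.index? ts h with
    | none =>
      have hnot : h ∉ ts := (PySem.List.index?_eq_none_iff _ _).mp hidx
      rw [vccLoopA_cons_none h hs errs (x :: ts) (by simp [hnot, Ne.symm hxh]),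
          vccLoopA_cons_none h hs errs ts hnot]
      exact ih _ _ htail
    | some i =>
      obtain ⟨hk, hget, -⟩ := PySem.List.getElem_of_index?_eq_some hidx
      have hidx' : PySem.List.index? (x :: ts) h = some (i + 1) := by
        rw [PySem.List.index?_cons_of_ne ts hxh, hidx]; rfl
      rw [vccLoopA_cons_idx h hs errs (x :: ts) (i + 1) hidx' (by simpa using hk),
          vccLoopA_cons_idx h hs errs ts i hidx hk,
          List.eraseIdx_cons_succ]
      exact ih _ _ htail

-- On sorted inputs A's index/pop loop computes B's merge.
lemma vccLoopA_eq_merge : ∀ (n : Nat) (rs ts errs : List String),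
    rs.length + ts.length ≤ n →
    rs.Pairwise (· ≤ ·) → ts.Pairwise (· ≤ ·) →
    vccLoopA rs errs ts = (errs ++ (vccMerge rs ts).1, (vccMerge rs ts).2) := by
  intro n
  induction n with
  | zero =>
    intro rs ts errs hlen _ _
    have : rs = [] := by cases rs <;> simp_all
    subst this
    simp [vccLoopA, vccMerge]
  | succ n ih =>
    intro rs ts errs hlen hrs hts
    match rs, ts with
    | [], ts => simp [vccLoopA, vccMerge]
    | h :: hs, [] =>
      have hlen0 : hs.length + ([] : List String).length ≤ n := by simp at hlen ⊢; omega
      rw [vccLoopA_cons_none h hs errs [] (by simp)]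
      rw [ih hs [] _ hlen0 hrs.of_cons hts, vccMerge]
      simp
    | h :: hs, x :: xs =>
      have hlen' : hs.length + (x :: xs).length ≤ n := by simp at hlen ⊢; omega
      have hlen'' : (h :: hs).length + xs.length ≤ n := by simp at hlen ⊢; omega
      have hlen''' : hs.length + xs.length ≤ n := by simp at hlen ⊢; omega
      rcases lt_trichotomy h x with hc | hc | hc
      · -- h < x : h not in table
        have hnot : h ∉ x :: xs := by
          intro hm
          rcases List.mem_cons.mp hm with rfl | hm
          · exact lt_irrefl _ hc
          · exact absurd (List.rel_of_pairwise_cons hts hm) (not_le.mpr hc)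
        rw [vccLoopA_cons_none h hs errs (x :: xs) hnot]
        rw [ih hs (x :: xs) _ hlen' hrs.of_cons hts]
        rw [vccMerge, if_pos hc]
        simp
      · -- h = x
        subst hc
        rw [show vccLoopA (h :: hs) errs (h :: xs) = vccLoopA hs errs xs from by
          rw [vccLoopA_cons_idx h hs errs (h :: xs) 0 (PySem.List.index?_cons_self h xs) (by simp)]
          simp]
        rw [vccMerge, if_neg (lt_irrefl _), if_neg (lt_irrefl _)]
        exact ih hs xs _ hlen''' hrs.of_cons hts.of_cons
      · -- x < h : x goes to leftovers
        have hall : ∀ h' ∈ h :: hs, x < h' := by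
          intro h' hm
          rcases List.mem_cons.mp hm with rfl | hm
          · exact hc
          · exact lt_of_lt_of_le hc (List.rel_of_pairwise_cons hrs hm)
        rw [vccLoopA_cons_lt _ _ _ _ hall]
        rw [ih (h :: hs) xs _ hlen'' hrs hts.of_cons]
        rw [vccMerge, if_neg (not_lt.mpr (le_of_lt hc)), if_pos hc]

-- ===== VERDICT (by name: the statement is the Claim_ definition above) =====
theorem validate_custom_columns_spec : Claim_equal_validate_custom_columns := by
  intro t r _
  unfold Spec_validate_custom_columns validate_custom_columns validate_custom_columns_alt
  by_cases ht : t = [] <;> by_cases hr : r = [] <;> simp only [ht, hr] <;> simp_all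
  have hrs : (PySem.List.sorted (r.map Prod.fst) (fun x => x)).Pairwise (· ≤ ·) := by
    simpa using PySem.List.sorted_pairwise (r.map Prod.fst) (fun x => x)
  have hts : (PySem.List.sorted t (fun x => x)).Pairwise (· ≤ ·) := by
    simpa using PySem.List.sorted_pairwise t (fun x => x)
  set rs := PySem.List.sorted (r.map Prod.fst) (fun x => x)
  set ts := PySem.List.sorted t (fun x => x)
  rw [vccLoopA_eq_merge (rs.length + ts.length) rs ts _ le_rfl hrs hts]
  cases hleft : (vccMerge rs ts).2 <;> simp
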